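-- pv_equiv track=rewrite | github.com/alikemalcelik42/ConvertSig | main.py | ConvertSig
-- ===== SOURCE A (Python) =====
-- def ConvertSig(text):
--     words = text.split(" ")
--
--     i = 0
--     sigedWords = []
--     for word in words:
--         sigedLetters = ""
--         for letter in word:
--             if i % 2 == 0:
--                 sigedLetters += letter.upper();
--             else:
--                 sigedLetters += letter.lower();
--             i += 1
--         sigedWords.append(sigedLetters)
--
--     sigedText = ""
--     for sigedWord in sigedWords:
--         sigedText += (sigedWord + " ")
--
--     sigedText = sigedText.replace("I", "İ")
--
--     return sigedText
-- ===== SOURCE B (Python) =====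
-- def ConvertSig(text):
--     # One flat pass: a parity counter over non-space characters; spaces pass through.
--     out = []
--     i = 0
--     for ch in text:
--         if ch == " ":
--             out.append(" ")
--         else:
--             out.append(ch.upper() if i % 2 == 0 else ch.lower())
--             i += 1
--     out.append(" ")
--     return "".join(out).replace("I", "İ")
-- ===== Notes on version B (the rewrite author's own statement) =====
-- stated objective: simpler
-- what changed: Replaced A's split-into-words, per-word alternating-case loop and rejoin-with-spaces by a single flat pass over the characters with a parity counter that skips spaces, appending one trailing space at the end.
import Mathlib
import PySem

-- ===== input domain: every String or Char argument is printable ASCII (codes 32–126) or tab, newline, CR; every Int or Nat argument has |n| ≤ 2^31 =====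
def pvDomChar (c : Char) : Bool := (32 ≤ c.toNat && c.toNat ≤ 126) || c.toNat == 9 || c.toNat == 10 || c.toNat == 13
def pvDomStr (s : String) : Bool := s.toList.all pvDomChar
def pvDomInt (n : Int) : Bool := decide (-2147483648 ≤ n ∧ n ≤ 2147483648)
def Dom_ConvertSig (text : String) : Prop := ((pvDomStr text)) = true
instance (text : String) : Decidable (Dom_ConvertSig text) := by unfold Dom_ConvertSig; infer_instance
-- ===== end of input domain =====

-- B replaces A's split-into-words / per-word alternation / rejoin by ONE flat pass with a
-- parity counter that skips spaces (objective: simpler; same asymptotic cost).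

-- ===== PORT A =====
def ConvertSig (text : String) : String :=
  let words := PySem.Chars.splitOn text.toList [' ']
  let st := words.foldl (fun (s : Nat × List (List Char)) word =>
      let r := word.foldl (fun (t : Nat × List Char) letter =>
          (t.1 + 1, t.2 ++ [if t.1 % 2 = 0 then PySem.Chars.upperChar letter
                            else PySem.Chars.lowerChar letter])) (s.1, ([] : List Char))
      (r.1, s.2 ++ [r.2])) (0, ([] : List (List Char)))
  let sigedText := st.2.foldl (fun (acc : List Char) w => acc ++ (w ++ [' '])) []
  String.ofList (PySem.Chars.replace sigedText ['I'] ['İ'])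

-- ===== PORT B =====
def ConvertSig_alt (text : String) : String :=
  let r := text.toList.foldl (fun (s : Nat × List Char) ch =>
      if ch = ' ' then (s.1, s.2 ++ [' '])
      else (s.1 + 1, s.2 ++ [if s.1 % 2 = 0 then PySem.Chars.upperChar ch
                             else PySem.Chars.lowerChar ch])) (0, ([] : List Char))
  String.ofList (PySem.Chars.replace (r.2 ++ [' ']) ['I'] ['İ'])

-- ===== PRECONDITION & SPEC =====
def Spec_ConvertSig (text : String) (out : String) : Prop := out = ConvertSig_alt text
instance (text : String) (out : String) : Decidable (Spec_ConvertSig text out) := by unfold Spec_ConvertSig; infer_instance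

-- ===== CLAIM (what is proved, stated in full; the proofs are below) =====
def Claim_equal_ConvertSig : Prop := ∀ (text : String), Dom_ConvertSig text → Spec_ConvertSig text (ConvertSig text)

-- ===== LEMMAS AND PROOFS =====

/-- split on a single space, structural form; `pre` is the word prefix already read. -/
def pvSplit (pre : List Char) : List Char → List (List Char)
  | [] => [pre]
  | c :: t => if c = ' ' then pre :: pvSplit [] t else pvSplit (pre ++ [c]) t

/-- alternating-case transform of one space-free word starting at counter `i`. -/
def pvWord (i : Nat) : List Char → List Char
  | [] => []
  | c :: t => (if i % 2 = 0 then PySem.Chars.upperChar c else PySem.Chars.lowerChar c) :: pvWord (i + 1) t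

/-- flat transform (B's loop, functionally). -/
def pvFlat (i : Nat) : List Char → List Char
  | [] => []
  | c :: t => if c = ' ' then ' ' :: pvFlat i t
              else (if i % 2 = 0 then PySem.Chars.upperChar c else PySem.Chars.lowerChar c) :: pvFlat (i + 1) t

/-- word list transform with running counter (A's outer loop, functionally). -/
def pvWords (i : Nat) : List (List Char) → List (List Char)
  | [] => []
  | w :: ws => pvWord i w :: pvWords (i + w.length) ws

/-- join with a trailing space after every word (A's third loop, functionally). -/
def pvJoinSp : List (List Char) → List Char
  | [] => []
  | w :: ws => w ++ ' ' :: pvJoinSp ws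

theorem pvSplitOn_go (fuel : Nat) : ∀ (l cur : List Char) (accs : List (List Char)),
    l.length ≤ fuel →
    PySem.Chars.splitOn.go [' '] fuel l cur accs = accs.reverse ++ pvSplit cur.reverse l := by
  induction fuel with
  | zero =>
    intro l cur accs h
    have hl : l = [] := List.eq_nil_of_length_eq_zero (Nat.le_zero.mp h)
    subst hl
    simp [PySem.Chars.splitOn.go, pvSplit]
  | succ n ih =>
    intro l cur accs h
    cases l with
    | nil => simp [PySem.Chars.splitOn.go, pvSplit]
    | cons c rest =>
      by_cases hc : c = ' '
      · subst hc
        rw [PySem.Chars.splitOn.go]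
        simp only [List.isPrefixOf, BEq.rfl, Bool.true_and, if_true, List.length_cons,
          List.drop_succ_cons, List.length_nil, List.drop_zero]
        rw [ih rest [] (cur.reverse :: accs) (by simpa using Nat.succ_le_succ_iff.mp h)]
        simp [pvSplit]
      · rw [PySem.Chars.splitOn.go]
        have hpre : [' '].isPrefixOf (c :: rest) = false := by
          simp [List.isPrefixOf]
          exact fun hh => hc hh.symm
        rw [hpre]
        simp only [Bool.false_eq_true, if_false]
        rw [ih rest (c :: cur) accs (Nat.succ_le_succ_iff.mp h)]
        simp [pvSplit, hc]

theorem pvSplitOn_eq (cs : List Char) :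
    PySem.Chars.splitOn cs [' '] = pvSplit [] cs := by
  rw [PySem.Chars.splitOn, pvSplitOn_go (cs.length + 1) cs [] [] (Nat.le_succ _)]
  simp

theorem pvWord_append (i : Nat) (w : List Char) (c : Char) :
    pvWord i (w ++ [c]) = pvWord i w ++
      [if (i + w.length) % 2 = 0 then PySem.Chars.upperChar c else PySem.Chars.lowerChar c] := by
  induction w generalizing i with
  | nil => simp [pvWord]
  | cons a t ih => simp [pvWord, ih, Nat.add_assoc, Nat.add_comm 1]

theorem pvInner_fold (w : List Char) : ∀ (i : Nat) (acc : List Char),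
    w.foldl (fun (t : Nat × List Char) letter =>
        (t.1 + 1, t.2 ++ [if t.1 % 2 = 0 then PySem.Chars.upperChar letter
                          else PySem.Chars.lowerChar letter])) (i, acc)
      = (i + w.length, acc ++ pvWord i w) := by
  induction w with
  | nil => intro i acc; simp [pvWord]
  | cons c t ih =>
    intro i acc
    simp [List.foldl, ih, pvWord, Nat.add_assoc, Nat.add_comm 1]

theorem pvOuter_fold (ws : List (List Char)) : ∀ (i : Nat) (acc : List (List Char)),
    ws.foldl (fun (s : Nat × List (List Char)) word =>
      let r := word.foldl (fun (t : Nat × List Char) letter =>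
          (t.1 + 1, t.2 ++ [if t.1 % 2 = 0 then PySem.Chars.upperChar letter
                            else PySem.Chars.lowerChar letter])) (s.1, ([] : List Char))
      (r.1, s.2 ++ [r.2])) (i, acc)
      = (i + (ws.map List.length).sum, acc ++ pvWords i ws) := by
  induction ws with
  | nil => intro i acc; simp [pvWords]
  | cons w ws ih =>
    intro i acc
    rw [List.foldl_cons]
    conv_lhs =>
      rw [show (let r := w.foldl (fun (t : Nat × List Char) letter =>
            (t.1 + 1, t.2 ++ [if t.1 % 2 = 0 then PySem.Chars.upperChar letter
                              else PySem.Chars.lowerChar letter])) (((i, acc) : Nat × List (List Char)).1, ([] : List Char))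
          ((r.1, ((i, acc) : Nat × List (List Char)).2 ++ [r.2]) : Nat × List (List Char)))
          = (i + w.length, acc ++ [pvWord i w]) from by simp [pvInner_fold]]
    rw [ih]
    simp [pvWords, Nat.add_assoc]

theorem pvJoin_fold (ws : List (List Char)) : ∀ (acc : List Char),
    ws.foldl (fun (acc : List Char) w => acc ++ (w ++ [' '])) acc = acc ++ pvJoinSp ws := by
  induction ws with
  | nil => intro acc; simp [pvJoinSp]
  | cons w ws ih => intro acc; simp [List.foldl, ih, pvJoinSp]

theorem pvFlat_fold (cs : List Char) : ∀ (i : Nat) (acc : List Char),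
    cs.foldl (fun (s : Nat × List Char) ch =>
      if ch = ' ' then (s.1, s.2 ++ [' '])
      else (s.1 + 1, s.2 ++ [if s.1 % 2 = 0 then PySem.Chars.upperChar ch
                             else PySem.Chars.lowerChar ch])) (i, acc)
      = (i + (cs.countP (fun c => c ≠ ' ')), acc ++ pvFlat i cs) := by
  induction cs with
  | nil => intro i acc; simp [pvFlat]
  | cons c t ih =>
    intro i acc
    by_cases hc : c = ' '
    · simp [List.foldl, hc, ih, pvFlat]
    · simp [List.foldl, hc, ih, pvFlat, Nat.add_assoc, Nat.add_comm 1]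

theorem pvKey (cs : List Char) : ∀ (i : Nat) (pre : List Char),
    pvJoinSp (pvWords i (pvSplit pre cs)) = pvWord i pre ++ pvFlat (i + pre.length) cs ++ [' '] := by
  induction cs with
  | nil => intro i pre; simp [pvSplit, pvWords, pvJoinSp, pvFlat]
  | cons c t ih =>
    intro i pre
    by_cases hc : c = ' '
    · subst hc
      simp [pvSplit, pvWords, pvJoinSp, ih, pvFlat, pvWord]
    · rw [show pvSplit pre (c :: t) = pvSplit (pre ++ [c]) t from by simp [pvSplit, hc], ih]
      simp [pvWord_append, hc, pvFlat, List.append_assoc, Nat.add_assoc]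

-- ===== VERDICT (by name: the statement is the Claim_ definition above) =====
theorem ConvertSig_spec : Claim_equal_ConvertSig := by
  intro text _
  unfold Spec_ConvertSig ConvertSig ConvertSig_alt
  simp only [pvSplitOn_eq, pvOuter_fold, pvFlat_fold, pvJoin_fold, List.nil_append]
  rw [pvKey]
  simp [pvWord]
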